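-- pv_equiv track=rewrite | github.com/chunkily/everybody_codes | quest19/part3.py | search
-- ===== SOURCE A (Python) =====
-- import heapq
--
-- def search(openings):
--     distances = list(openings.keys())
--     heap = [(0, -1, 0)]  # (cost, idx, height)
--     best = {}  # (idx, height) -> best cost seen
--
--     target_idx = len(distances) - 1
--
--     while heap:
--         cost, idx, height = heapq.heappop(heap)
--         key = (idx, height)
--
--         # Skip if we've already found a better path to this state
--         if best.get(key, float("inf")) <= cost:
--             continue
--
--         best[key] = cost
--
--         next_idx = idx + 1
--         if next_idx > target_idx:
--             return cost  # Reached the end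
--
--         distance = distances[idx] if idx >= 0 else 0
--         next_distance = distances[next_idx]
--
--         gap = next_distance - distance
--         next_openings = openings[next_distance]
--
--         actions = get_permissible_actions(gap, height, next_openings)
--
--         for ascents, next_height in actions:
--             next_cost = cost + ascents
--             next_key = (next_idx, next_height)
--
--             if best.get(next_key, float("inf")) <= next_cost:
--                 continue
--             heapq.heappush(heap, (next_cost, next_idx, next_height))
--     # No valid path found
--     return None
--
-- def get_permissible_actions(gap, height, openings_at_idx):
--     height_without_flaps = height - gap
--     output = list()
--     for oh, sz in openings_at_idx:
--         min_a = max(0, (oh - height_without_flaps + 1) // 2)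
--         max_a = min(gap, (oh + sz - 1 - height_without_flaps) // 2)
--         if min_a <= max_a:
--             for a in range(min_a, max_a + 1):
--                 output.append((a, height_without_flaps + 2 * a))
--     return output
-- ===== SOURCE B (Python) =====
-- def search(openings):
--     # DAG dynamic programming: sweep the layers in key order keeping, per layer,
--     # a dict height -> minimal cost; no priority queue needed since every edge
--     # goes from one layer to the next.
--     frontier = {0: 0}  # height -> min cost at previous layer (virtual start)
--     prev_distance = 0
--     for distance in openings:
--         gap = distance - prev_distance
--         nxt = {}
--         for height, cost in frontier.items():
--             for ascents, next_height in get_permissible_actions(gap, height, openings[distance]):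
--                 next_cost = cost + ascents
--                 if next_height not in nxt or next_cost < nxt[next_height]:
--                     nxt[next_height] = next_cost
--         frontier = nxt
--         prev_distance = distance
--     if not frontier:
--         return None
--     return min(frontier.values())
--
-- def get_permissible_actions(gap, height, openings_at_idx):
--     height_without_flaps = height - gap
--     output = list()
--     for oh, sz in openings_at_idx:
--         min_a = max(0, (oh - height_without_flaps + 1) // 2)
--         max_a = min(gap, (oh + sz - 1 - height_without_flaps) // 2)
--         if min_a <= max_a:
--             for a in range(min_a, max_a + 1):
--                 output.append((a, height_without_flaps + 2 * a))
--     return output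
-- ===== Notes on version B (the rewrite author's own statement) =====
-- stated objective: alternative
-- what changed: A runs Dijkstra with a binary heap and a visited map over (layer, height) states; B exploits that every edge goes from layer idx to idx+1, so it sweeps the layers once in key order keeping a dict of minimal cost per height (topological DP on the layered DAG) and returns the min over the final layer — no priority queue, no global best map.
import Mathlib
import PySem

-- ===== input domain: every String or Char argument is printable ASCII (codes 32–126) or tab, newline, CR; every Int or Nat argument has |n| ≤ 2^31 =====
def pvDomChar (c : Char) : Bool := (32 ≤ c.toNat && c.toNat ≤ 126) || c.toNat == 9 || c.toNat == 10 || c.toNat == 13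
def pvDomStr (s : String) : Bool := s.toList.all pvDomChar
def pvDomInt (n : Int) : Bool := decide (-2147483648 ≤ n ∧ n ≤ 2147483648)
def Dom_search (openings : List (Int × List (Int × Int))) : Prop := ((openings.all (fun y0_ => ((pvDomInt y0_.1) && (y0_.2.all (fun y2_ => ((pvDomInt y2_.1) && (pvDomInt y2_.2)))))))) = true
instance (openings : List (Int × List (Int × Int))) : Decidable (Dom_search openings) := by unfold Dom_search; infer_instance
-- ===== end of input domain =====

-- B replaces A's heap-based Dijkstra by a single topological sweep over the layers
-- (a DP dict height -> min cost per layer): a genuinely different algorithm, no heap.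

-- ===== PORT A =====

-- helper of both Pythons (module-level function get_permissible_actions)
def get_permissible_actions (gap height : Int) (openings_at_idx : List (Int × Int)) :
    List (Int × Int) :=
  -- height_without_flaps = height - gap, min_a / max_a written inline
  openings_at_idx.foldl (fun output p =>
    if max 0 (PySem.Int.floordiv (p.1 - (height - gap) + 1) 2)
        ≤ min gap (PySem.Int.floordiv (p.1 + p.2 - 1 - (height - gap)) 2) then
      output ++ (PySem.List.pyRange (max 0 (PySem.Int.floordiv (p.1 - (height - gap) + 1) 2))
          (min gap (PySem.Int.floordiv (p.1 + p.2 - 1 - (height - gap)) 2) + 1) 1).map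
        (fun a => (a, (height - gap) + 2 * a))
    else output) []

-- heapq on triples: Python's tuple order is lexicographic; we keep the heap as a
-- sorted list (pop = head, push = ordered insert), which pops the same values.
def pvHeapLE (x y : Int × Int × Int) : Bool :=
  decide (x.1 < y.1 ∨ (x.1 = y.1 ∧ (x.2.1 < y.2.1 ∨ (x.2.1 = y.2.1 ∧ x.2.2 ≤ y.2.2))))

def pvHeapPush : List (Int × Int × Int) → (Int × Int × Int) → List (Int × Int × Int)
  | [], e => [e]
  | x :: xs, e => if pvHeapLE x e then x :: pvHeapPush xs e else e :: x :: xs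

-- fuel: a totalization guard only (proved never to run out); the loop is A's while-loop verbatim
def pvSizeS (d0 : PySem.Dict Int (List (Int × Int))) (ds : List Int) : Nat :=
  (ds.map (fun d => (((d0.get? d).getD []).map (fun q => q.2.toNat)).sum)).sum

def pvFuel (d0 : PySem.Dict Int (List (Int × Int))) (ds : List Int) : Nat :=
  (pvSizeS d0 ds + 2) * (pvSizeS d0 ds + 2)

-- the while-loop of A; indices are in range on every reachable state (proved below), so
-- the `.getD` defaults after pyGet?/get? are never used
def pvLoopA (d0 : PySem.Dict Int (List (Int × Int))) (ds : List Int) (target : Int) :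
    Nat → List (Int × Int × Int) → PySem.Dict (Int × Int) Int → Option Int
  | 0, _, _ => none
  | _ + 1, [], _ => none
  | fuel + 1, (c, i, h) :: rest, best =>
      if (match best.get? (i, h) with | some v => decide (v ≤ c) | none => false) then
        pvLoopA d0 ds target fuel rest best
      else
        let best' := best.insert (i, h) c
        if target < i + 1 then some c
        else
          let distance := if 0 ≤ i then (PySem.List.pyGet? ds i).getD 0 else 0
          let next_distance := (PySem.List.pyGet? ds (i + 1)).getD 0
          let gap := next_distance - distance
          let next_openings := (d0.get? next_distance).getD []
          let actions := get_permissible_actions gap h next_openings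
          let heap' := actions.foldl (fun hp p =>
            if (match best'.get? (i + 1, p.2) with | some v => decide (v ≤ c + p.1) | none => false)
            then hp
            else pvHeapPush hp (c + p.1, i + 1, p.2)) rest
          pvLoopA d0 ds target fuel heap' best'

def search (openings : List (Int × List (Int × Int))) : Option Int :=
  let d0 := PySem.Dict.mk openings
  let ds := d0.keys
  let target : Int := (ds.length : Int) - 1
  pvLoopA d0 ds target (pvFuel d0 ds) [(0, -1, 0)] PySem.Dict.empty

-- ===== PORT B =====

-- one layer of the DP: relax every action from every frontier height into a fresh dict
def pvRelax (frontier : PySem.Dict Int Int) (gap : Int) (layer : List (Int × Int)) :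
    PySem.Dict Int Int :=
  frontier.items.foldl (fun nxt hc =>
    (get_permissible_actions gap hc.1 layer).foldl (fun nxt an =>
      if (match nxt.get? an.2 with | some v => decide (hc.2 + an.1 < v) | none => true) then
        nxt.insert an.2 (hc.2 + an.1)
      else nxt) nxt) PySem.Dict.empty

def search_alt (openings : List (Int × List (Int × Int))) : Option Int :=
  let d0 := PySem.Dict.mk openings
  let fin := d0.keys.foldl (fun (st : PySem.Dict Int Int × Int) d =>
      (pvRelax st.1 (d - st.2) ((d0.get? d).getD []), d))
    (PySem.Dict.mk [((0 : Int), (0 : Int))], 0)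
  PySem.List.min? fin.1.values (fun v => v)

-- ===== PRECONDITION & SPEC =====
def Spec_search (openings : List (Int × List (Int × Int))) (out : Option Int) : Prop := out = search_alt openings
instance (openings : List (Int × List (Int × Int))) (out : Option Int) : Decidable (Spec_search openings out) := by unfold Spec_search; infer_instance

-- ===== CLAIM (what is proved, stated in full; the proofs are below) =====
def Claim_equal_search : Prop := ∀ (openings : List (Int × List (Int × Int))), Dom_search openings → Spec_search openings (search openings)

-- ===== LEMMAS AND PROOFS =====

-- ---------- proof-side layer machinery ----------

def pvPrevD (ds : List Int) (j : Nat) : Int := if j = 0 then 0 else ds.getD (j - 1) 0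
def pvGapL (ds : List Int) (j : Nat) : Int := ds.getD j 0 - pvPrevD ds j
def pvLayerL (d0 : PySem.Dict Int (List (Int × Int))) (ds : List Int) (j : Nat) :
    List (Int × Int) := (d0.get? (ds.getD j 0)).getD []

def pvF (d0 : PySem.Dict Int (List (Int × Int))) (ds : List Int) : Nat → PySem.Dict Int Int
  | 0 => PySem.Dict.mk [((0 : Int), (0 : Int))]
  | j + 1 => pvRelax (pvF d0 ds j) (pvGapL ds j) (pvLayerL d0 ds j)

def pvDelta (d0 : PySem.Dict Int (List (Int × Int))) (ds : List Int) (i h : Int) : Option Int :=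
  if -1 ≤ i ∧ i ≤ (ds.length : Int) - 1 then (pvF d0 ds (i + 1).toNat).get? h else none

-- ---------- invariant ----------

def pvSorted (heap : List (Int × Int × Int)) : Prop :=
  List.Pairwise (fun a b => pvHeapLE a b = true) heap

def pvInv (d0 : PySem.Dict Int (List (Int × Int))) (ds : List Int)
    (heap : List (Int × Int × Int)) (best : PySem.Dict (Int × Int) Int) : Prop :=
  pvSorted heap ∧
  (∀ c i h, (c, i, h) ∈ heap → ∃ d, pvDelta d0 ds i h = some d ∧ d ≤ c) ∧
  (∀ i h v, best.get? (i, h) = some v → pvDelta d0 ds i h = some v) ∧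
  best.keys.Nodup ∧
  (∀ i h v, best.get? (i, h) = some v → i + 1 ≤ (ds.length : Int) - 1 →
    ∀ a h', (a, h') ∈ get_permissible_actions (pvGapL ds (i + 1).toNat) h (pvLayerL d0 ds (i + 1).toNat) →
      (∃ c', (c', i + 1, h') ∈ heap ∧ c' ≤ v + a) ∨ (∃ w, best.get? (i + 1, h') = some w)) ∧
  ((∃ c', (c', -1, 0) ∈ heap ∧ c' ≤ 0) ∨ (∃ w, best.get? (-1, 0) = some w)) ∧
  (∀ h w, best.get? ((ds.length : Int) - 1, h) = some w → False)

def pvMu (d0 : PySem.Dict Int (List (Int × Int))) (ds : List Int)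
    (heap : List (Int × Int × Int)) (best : PySem.Dict (Int × Int) Int) : Nat :=
  (pvSizeS d0 ds + 2) * (pvSizeS d0 ds + 1 - best.keys.length) + heap.length

-- ---------- small generic lemmas ----------

theorem pv_nodup_subset_length {α : Type} [DecidableEq α] {l1 l2 : List α}
    (h1 : l1.Nodup) (h2 : l1 ⊆ l2) : l1.length ≤ l2.length := by
  calc l1.length = l1.toFinset.card := (List.toFinset_card_of_nodup h1).symm
    _ ≤ l2.toFinset.card := Finset.card_le_card (fun x hx => by
        simp only [List.mem_toFinset] at hx ⊢; exact h2 hx)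
    _ ≤ l2.length := List.toFinset_card_le l2

theorem pv_foldl_append_ite {α β : Type} (l : List α) (f : List β → α → List β)
    (g : α → List β) (hf : ∀ acc x, f acc x = acc ++ g x) :
    ∀ acc, l.foldl f acc = acc ++ l.flatMap g := by
  induction l with
  | nil => intro acc; simp
  | cons x t ih => intro acc; simp only [List.foldl_cons, hf, ih, List.flatMap_cons, List.append_assoc]

theorem pv_foldl_nested {α β γ δ' : Type} (xs : List α) (g : α → List β) (f : γ → δ' → γ)
    (m : α → β → δ') (init : γ) :
    xs.foldl (fun acc x => (g x).foldl (fun a b => f a (m x b)) acc) init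
      = (xs.flatMap (fun x => (g x).map (m x))).foldl f init := by
  induction xs generalizing init with
  | nil => simp
  | cons x t ih =>
      simp only [List.foldl_cons, List.flatMap_cons, List.foldl_append, ← List.foldl_map (f := m x)]
      exact ih _

theorem pv_range_getD (ds : List Int) :
    (List.range ds.length).map (fun j => ds.getD j 0) = ds := by
  apply List.ext_getElem
  · simp
  · intro i h1 h2
    simp [List.getD_eq_getElem?_getD, List.getElem?_eq_getElem h2]

-- ---------- heap lemmas ----------

theorem pvHeapLE_total (x y : Int × Int × Int) (h : ¬ pvHeapLE x y = true) : pvHeapLE y x = true := by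
  simp only [pvHeapLE, decide_eq_true_eq] at h ⊢; omega

theorem pvHeapLE_trans {x y z : Int × Int × Int} (h1 : pvHeapLE x y = true)
    (h2 : pvHeapLE y z = true) : pvHeapLE x z = true := by
  simp only [pvHeapLE, decide_eq_true_eq] at h1 h2 ⊢; omega

theorem pvHeapLE_cost {x y : Int × Int × Int} (h : pvHeapLE x y = true) : x.1 ≤ y.1 := by
  simp only [pvHeapLE, decide_eq_true_eq] at h; omega

theorem pvHeapPush_mem {hp : List (Int × Int × Int)} {e y : Int × Int × Int} :
    y ∈ pvHeapPush hp e ↔ y ∈ hp ∨ y = e := by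
  induction hp with
  | nil => simp [pvHeapPush]
  | cons x t ih =>
      simp only [pvHeapPush]
      split
      · simp [ih]; tauto
      · simp; tauto

theorem pvHeapPush_length (hp : List (Int × Int × Int)) (e : Int × Int × Int) :
    (pvHeapPush hp e).length = hp.length + 1 := by
  induction hp with
  | nil => rfl
  | cons x t ih => simp only [pvHeapPush]; split <;> simp [ih]

theorem pvHeapPush_sorted {hp : List (Int × Int × Int)} (e : Int × Int × Int)
    (h : pvSorted hp) : pvSorted (pvHeapPush hp e) := by
  induction hp with
  | nil => simpa [pvHeapPush, pvSorted] using List.pairwise_singleton _ _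
  | cons x t ih =>
      rcases List.pairwise_cons.mp h with ⟨hx, ht⟩
      simp only [pvHeapPush]
      split
      · rename_i hle
        refine List.pairwise_cons.mpr ⟨?_, ih ht⟩
        intro y hy
        rcases pvHeapPush_mem.mp hy with hy' | rfl
        · exact hx y hy'
        · exact hle
      · rename_i hle
        have hex : pvHeapLE e x = true := pvHeapLE_total x e hle
        refine List.pairwise_cons.mpr ⟨?_, h⟩
        intro y hy
        rcases List.mem_cons.mp hy with rfl | hy'
        · exact hex
        · exact pvHeapLE_trans hex (hx y hy')

theorem pvSorted_head_min {c i h : Int} {rest : List (Int × Int × Int)}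
    (hs : pvSorted ((c, i, h) :: rest)) {y : Int × Int × Int} (hy : y ∈ (c, i, h) :: rest) :
    c ≤ y.1 := by
  rcases List.mem_cons.mp hy with rfl | hy'
  · exact le_refl _
  · exact pvHeapLE_cost ((List.pairwise_cons.mp hs).1 y hy')

-- ---------- get_permissible_actions facts ----------

theorem pv_gpa_eq (gap height : Int) (layer : List (Int × Int)) :
    get_permissible_actions gap height layer = layer.flatMap (fun p =>
      if max 0 (PySem.Int.floordiv (p.1 - (height - gap) + 1) 2)
          ≤ min gap (PySem.Int.floordiv (p.1 + p.2 - 1 - (height - gap)) 2) then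
        (PySem.List.pyRange (max 0 (PySem.Int.floordiv (p.1 - (height - gap) + 1) 2))
            (min gap (PySem.Int.floordiv (p.1 + p.2 - 1 - (height - gap)) 2) + 1) 1).map
          (fun a => (a, (height - gap) + 2 * a))
      else []) := by
  unfold get_permissible_actions
  refine (pv_foldl_append_ite _ _
    (fun p => if max 0 (PySem.Int.floordiv (p.1 - (height - gap) + 1) 2)
        ≤ min gap (PySem.Int.floordiv (p.1 + p.2 - 1 - (height - gap)) 2) then
      (PySem.List.pyRange (max 0 (PySem.Int.floordiv (p.1 - (height - gap) + 1) 2))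
          (min gap (PySem.Int.floordiv (p.1 + p.2 - 1 - (height - gap)) 2) + 1) 1).map
        (fun a => (a, (height - gap) + 2 * a))
      else []) (fun acc p => by
      dsimp only
      split
      · rfl
      · exact (List.append_nil acc).symm) []).trans (by simp)

theorem pv_gpa_mem {gap height : Int} {layer : List (Int × Int)} {a h' : Int}
    (hm : (a, h') ∈ get_permissible_actions gap height layer) :
    0 ≤ a ∧ h' = height - gap + 2 * a ∧
      ∃ p ∈ layer, p.1 ≤ h' ∧ h' ≤ p.1 + p.2 - 1 := by
  rw [pv_gpa_eq] at hm
  simp only [List.mem_flatMap] at hm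
  obtain ⟨p, hp, hmem⟩ := hm
  split at hmem
  · simp only [List.mem_map] at hmem
    obtain ⟨x, hx, hxe⟩ := hmem
    rw [PySem.List.mem_pyRange_one] at hx
    injection hxe with e1 e2
    subst e1; subst e2
    have h2 : PySem.Int.floordiv (p.1 - (height - gap) + 1) 2 = (p.1 - (height - gap) + 1) / 2 := by
      simp [PySem.Int.floordiv, Int.fdiv_eq_ediv]
    have h3 : PySem.Int.floordiv (p.1 + p.2 - 1 - (height - gap)) 2
        = (p.1 + p.2 - 1 - (height - gap)) / 2 := by
      simp [PySem.Int.floordiv, Int.fdiv_eq_ediv]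
    rw [h2, h3] at hx
    refine ⟨by omega, rfl, p, hp, by omega, by omega⟩
  · simp at hmem

theorem pv_gpa_length {gap height : Int} (layer : List (Int × Int)) :
    (get_permissible_actions gap height layer).length ≤ (layer.map (fun q => q.2.toNat)).sum := by
  rw [pv_gpa_eq, List.length_flatMap]
  rw [show (layer.map (fun q => q.2.toNat)) = layer.map ((fun q : Int × Int => q.2.toNat)) from rfl]
  apply List.sum_le_sum
  intro p hp
  dsimp only
  split
  · rename_i hcond
    rw [List.length_map, PySem.List.length_pyRange_one]
    simp only [PySem.Int.floordiv, Int.fdiv_eq_ediv] at hcond ⊢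
    omega
  · simp

-- ---------- pvRelax characterization ----------

def pvRelaxStep (nxt : PySem.Dict Int Int) (p : Int × Int) : PySem.Dict Int Int :=
  if (match nxt.get? p.1 with | some v => decide (p.2 < v) | none => true) then
    nxt.insert p.1 p.2
  else nxt

def pvOptRelax (o : Option Int) (v : Int) : Option Int :=
  match o with
  | none => some v
  | some w => if v < w then some v else some w

def pvUpds (fr : PySem.Dict Int Int) (gap : Int) (layer : List (Int × Int)) :
    List (Int × Int) :=
  fr.items.flatMap (fun hc =>
    (get_permissible_actions gap hc.1 layer).map (fun an => (an.2, hc.2 + an.1)))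

def pvCand (fr : PySem.Dict Int Int) (gap : Int) (layer : List (Int × Int)) (h' : Int) :
    List Int :=
  ((pvUpds fr gap layer).filter (fun p => p.1 == h')).map (fun p => p.2)

theorem pvRelax_eq (fr : PySem.Dict Int Int) (gap : Int) (layer : List (Int × Int)) :
    pvRelax fr gap layer = (pvUpds fr gap layer).foldl pvRelaxStep PySem.Dict.empty := by
  unfold pvRelax pvUpds
  exact pv_foldl_nested fr.items (fun hc => get_permissible_actions gap hc.1 layer)
    pvRelaxStep (fun hc an => (an.2, hc.2 + an.1)) PySem.Dict.empty

theorem pv_relaxFold_get? (upds : List (Int × Int)) (d : PySem.Dict Int Int) (k : Int) :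
    (upds.foldl pvRelaxStep d).get? k
      = ((upds.filter (fun p => p.1 == k)).map (fun p => p.2)).foldl pvOptRelax (d.get? k) := by
  induction upds generalizing d with
  | nil => simp
  | cons p t ih =>
      simp only [List.foldl_cons]
      rw [ih]
      by_cases hpk : p.1 = k
      · subst hpk
        rw [List.filter_cons_of_pos (by simp), List.map_cons, List.foldl_cons]
        congr 1
        unfold pvRelaxStep pvOptRelax
        cases hdk : d.get? p.1 with
        | none => simp [hdk, PySem.Dict.get?_insert]
        | some v =>
            simp only [hdk]
            by_cases hlt : p.2 < v
            · simp [hlt, PySem.Dict.get?_insert]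
            · simp [hlt, hdk]
      · rw [List.filter_cons_of_neg (by simpa using hpk)]
        congr 1
        unfold pvRelaxStep
        repeat' split
        all_goals first
          | rw [PySem.Dict.get?_insert, if_neg (fun hh => hpk hh.symm)]
          | rfl

theorem pv_relaxFold_nodup (upds : List (Int × Int)) (d : PySem.Dict Int Int)
    (hd : d.keys.Nodup) : (upds.foldl pvRelaxStep d).keys.Nodup := by
  induction upds generalizing d with
  | nil => exact hd
  | cons p t ih =>
      refine ih _ ?_
      unfold pvRelaxStep
      (repeat' split) <;> first
        | exact PySem.Dict.nodup_keys_insert _ _ _ hd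
        | exact hd

theorem pvRelax_nodup (fr : PySem.Dict Int Int) (gap : Int) (layer : List (Int × Int)) :
    (pvRelax fr gap layer).keys.Nodup := by
  rw [pvRelax_eq]
  exact pv_relaxFold_nodup _ _ (by simp [PySem.Dict.empty, PySem.Dict.keys])

theorem pvF_nodup (d0 : PySem.Dict Int (List (Int × Int))) (ds : List Int) (j : Nat) :
    (pvF d0 ds j).keys.Nodup := by
  cases j with
  | zero => simp [pvF, PySem.Dict.keys]
  | succ j => exact pvRelax_nodup _ _ _

theorem pv_optRelax_le (o : Option Int) (x : Int) :
    ∃ z, pvOptRelax o x = some z ∧ z ≤ x ∧ (∀ w, o = some w → z ≤ w) := by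
  cases o with
  | none => exact ⟨x, rfl, le_refl _, by simp⟩
  | some w =>
      simp only [pvOptRelax]
      split
      · exact ⟨x, rfl, le_refl _, fun w' hw' => by cases hw'; omega⟩
      · exact ⟨w, rfl, by omega, fun w' hw' => by cases hw'; omega⟩

theorem pv_optfold_some {l : List Int} {o : Option Int} {v : Int}
    (h : l.foldl pvOptRelax o = some v) :
    (v ∈ l ∨ o = some v) ∧ (∀ y ∈ l, v ≤ y) ∧ (∀ w, o = some w → v ≤ w) := by
  induction l generalizing o with
  | nil =>
      refine ⟨Or.inr h, by simp, fun w hw => ?_⟩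
      rw [hw] at h
      exact le_of_eq (Option.some.inj h).symm
  | cons x t ih =>
      simp only [List.foldl_cons] at h
      obtain ⟨hmem, hle, ho⟩ := ih h
      obtain ⟨z, hz, hzx, hzw⟩ := pv_optRelax_le o x
      have hvz : v ≤ z := by
        rcases hmem with hm | hm
        · exact ho z hz
        · exact ho z hz
      refine ⟨?_, ?_, ?_⟩
      · rcases hmem with hm | hm
        · exact Or.inl (List.mem_cons_of_mem _ hm)
        · -- pvOptRelax o x = some v : v = z
          rw [hz] at hm
          have : z = v := Option.some.inj hm
          subst this
          cases o with
          | none => exact Or.inl (by cases hz; exact List.mem_cons_self)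
          | some w =>
              simp only [pvOptRelax] at hz
              split at hz
              · cases hz; exact Or.inl List.mem_cons_self
              · cases hz; exact Or.inr rfl
      · intro y hy
        rcases List.mem_cons.mp hy with rfl | hy'
        · exact le_trans hvz hzx
        · exact hle y hy'
      · intro w hw
        exact le_trans hvz (hzw w hw)

theorem pv_optfold_le {l : List Int} {o : Option Int} {y : Int}
    (h : y ∈ l ∨ o = some y) :
    ∃ v, l.foldl pvOptRelax o = some v ∧ v ≤ y := by
  induction l generalizing o y with
  | nil =>
      rcases h with hm | hm
      · simp at hm
      · exact ⟨y, hm, le_refl _⟩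
  | cons x t ih =>
      simp only [List.foldl_cons]
      obtain ⟨z, hz, hzx, hzw⟩ := pv_optRelax_le o x
      rcases h with hm | hm
      · rcases List.mem_cons.mp hm with rfl | hy'
        · obtain ⟨v, hv, hvz⟩ := ih (Or.inr hz)
          exact ⟨v, hv, le_trans hvz hzx⟩
        · exact ih (Or.inl hy')
      · obtain ⟨v, hv, hvz⟩ := ih (Or.inr hz)
        exact ⟨v, hv, le_trans hvz (hzw y hm)⟩

theorem pvCand_mem {fr : PySem.Dict Int Int} {gap : Int} {layer : List (Int × Int)} {h' x : Int}
    (hnd : fr.keys.Nodup) :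
    x ∈ pvCand fr gap layer h' ↔
      ∃ h c a, fr.get? h = some c ∧ (a, h') ∈ get_permissible_actions gap h layer ∧ x = c + a := by
  unfold pvCand pvUpds
  constructor
  · intro hx
    simp only [List.mem_map, List.mem_filter, List.mem_flatMap] at hx
    obtain ⟨p, ⟨⟨hc, hhc, ⟨an, han, rfl⟩⟩, hk⟩, rfl⟩ := hx
    simp only [beq_iff_eq] at hk
    refine ⟨hc.1, hc.2, an.1, PySem.Dict.get?_of_mem_items _ hhc hnd, ?_, rfl⟩
    subst hk
    simpa using han
  · rintro ⟨h, c, a, hget, hmem, rfl⟩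
    simp only [List.mem_map, List.mem_filter, List.mem_flatMap]
    exact ⟨((h':Int), c + a), ⟨⟨(h, c), PySem.Dict.mem_items_of_get?_eq_some _ hget,
      ⟨(a, h'), hmem, rfl⟩⟩, by simp⟩, rfl⟩

theorem pvF_get?_eq (d0 : PySem.Dict Int (List (Int × Int))) (ds : List Int) (j : Nat) (h' : Int) :
    (pvF d0 ds (j + 1)).get? h'
      = (pvCand (pvF d0 ds j) (pvGapL ds j) (pvLayerL d0 ds j) h').foldl pvOptRelax none := by
  show (pvRelax _ _ _).get? h' = _
  rw [pvRelax_eq, pv_relaxFold_get?, PySem.Dict.get?_empty]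
  rfl

theorem pvF_succ_char {d0 : PySem.Dict Int (List (Int × Int))} {ds : List Int} {j : Nat}
    {h' v : Int} (hv : (pvF d0 ds (j + 1)).get? h' = some v) :
    (∃ h c a, (pvF d0 ds j).get? h = some c ∧
        (a, h') ∈ get_permissible_actions (pvGapL ds j) h (pvLayerL d0 ds j) ∧ v = c + a) ∧
    (∀ h c a, (pvF d0 ds j).get? h = some c →
        (a, h') ∈ get_permissible_actions (pvGapL ds j) h (pvLayerL d0 ds j) → v ≤ c + a) := by
  rw [pvF_get?_eq] at hv
  obtain ⟨hmem, hle, -⟩ := pv_optfold_some hv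
  have hnd := pvF_nodup d0 ds j
  constructor
  · rcases hmem with hmem | hmem
    · obtain ⟨h, c, a, h1, h2, rfl⟩ := (pvCand_mem hnd).mp hmem
      exact ⟨h, c, a, h1, h2, rfl⟩
    · simp at hmem
  · intro h c a h1 h2
    exact hle _ ((pvCand_mem hnd).mpr ⟨h, c, a, h1, h2, rfl⟩)

theorem pvF_succ_le {d0 : PySem.Dict Int (List (Int × Int))} {ds : List Int} {j : Nat}
    {h c a h' : Int} (hc : (pvF d0 ds j).get? h = some c)
    (he : (a, h') ∈ get_permissible_actions (pvGapL ds j) h (pvLayerL d0 ds j)) :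
    ∃ v, (pvF d0 ds (j + 1)).get? h' = some v ∧ v ≤ c + a := by
  rw [pvF_get?_eq]
  exact pv_optfold_le (Or.inl ((pvCand_mem (pvF_nodup d0 ds j)).mpr ⟨h, c, a, hc, he, rfl⟩))

theorem pvF_zero_get? {d0 : PySem.Dict Int (List (Int × Int))} {ds : List Int} {h v : Int}
    (hv : (pvF d0 ds 0).get? h = some v) : h = 0 ∧ v = 0 := by
  simp only [pvF, PySem.Dict.get?_mk_cons] at hv
  split at hv
  · rename_i hh; simp only [beq_iff_eq] at hh; cases hv; omega
  · simp [PySem.Dict.get?] at hv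

-- ---------- B port equals the layered DP ----------

theorem pv_foldB (d0 : PySem.Dict Int (List (Int × Int))) (ds : List Int) :
    ∀ j, j ≤ ds.length →
      (ds.take j).foldl (fun (st : PySem.Dict Int Int × Int) d =>
          (pvRelax st.1 (d - st.2) ((d0.get? d).getD []), d))
        (PySem.Dict.mk [((0 : Int), (0 : Int))], 0)
      = (pvF d0 ds j, pvPrevD ds j) := by
  intro j
  induction j with
  | zero => intro _; simp [pvF, pvPrevD]
  | succ j ih =>
      intro hj
      have hjlt : j < ds.length := by omega
      rw [List.take_succ, List.getElem?_eq_getElem hjlt]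
      simp only [Option.toList_some, List.foldl_append, ih (by omega), List.foldl_cons,
        List.foldl_nil]
      have hgd : ds.getD j 0 = ds[j] := List.getD_eq_getElem ds 0 hjlt
      show (pvRelax (pvF d0 ds j) (ds[j] - pvPrevD ds j) ((d0.get? ds[j]).getD []), ds[j])
        = (pvF d0 ds (j + 1), pvPrevD ds (j + 1))
      rw [show pvF d0 ds (j+1) = pvRelax (pvF d0 ds j) (pvGapL ds j) (pvLayerL d0 ds j) from rfl]
      simp [pvGapL, pvLayerL, pvPrevD, List.getD_eq_getElem?_getD, List.getElem?_eq_getElem hjlt]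

theorem search_alt_eq_dp (openings : List (Int × List (Int × Int))) :
    search_alt openings =
      PySem.List.min?
        ((pvF (PySem.Dict.mk openings) (PySem.Dict.mk openings).keys
          (PySem.Dict.mk openings).keys.length).values) (fun v => v) := by
  have hfold := pv_foldB (PySem.Dict.mk openings) (PySem.Dict.mk openings).keys
    (PySem.Dict.mk openings).keys.length (le_refl _)
  rw [List.take_length] at hfold
  show PySem.List.min?
      (((PySem.Dict.mk openings).keys.foldl (fun (st : PySem.Dict Int Int × Int) d =>
        (pvRelax st.1 (d - st.2) (((PySem.Dict.mk openings).get? d).getD []), d))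
        (PySem.Dict.mk [((0 : Int), (0 : Int))], 0)).1).values (fun v => v) = _
  rw [hfold]

-- ---------- size bookkeeping ----------

theorem pv_keys_length_le (d0 : PySem.Dict Int (List (Int × Int))) (ds : List Int) (j : Nat) :
    (pvF d0 ds (j + 1)).keys.length
      ≤ ((pvLayerL d0 ds j).map (fun q => q.2.toNat)).sum := by
  have hsub : (pvF d0 ds (j + 1)).keys ⊆
      (pvLayerL d0 ds j).flatMap (fun p => PySem.List.pyRange p.1 (p.1 + p.2) 1) := by
    intro h' hk
    have hne : (pvF d0 ds (j + 1)).get? h' ≠ none := by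
      intro hno
      rw [PySem.Dict.get?_eq_none_iff_not_mem_keys] at hno
      exact hno (by simpa using hk)
    obtain ⟨v, hv⟩ := Option.ne_none_iff_exists'.mp hne
    obtain ⟨⟨h, c, a, _, hmem, _⟩, -⟩ := pvF_succ_char hv
    obtain ⟨-, -, p, hp, hb1, hb2⟩ := pv_gpa_mem hmem
    exact List.mem_flatMap.mpr ⟨p, hp, PySem.List.mem_pyRange_one.mpr ⟨hb1, by omega⟩⟩
  refine le_trans (pv_nodup_subset_length (pvF_nodup d0 ds (j + 1)) hsub) ?_
  rw [List.length_flatMap]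
  apply le_of_eq
  congr 1
  apply List.map_congr_left
  intro p _
  simp only [PySem.List.length_pyRange_one]
  omega

theorem pv_layer_le_S (d0 : PySem.Dict Int (List (Int × Int))) (ds : List Int) (j : Nat)
    (hj : j < ds.length) :
    ((pvLayerL d0 ds j).map (fun q => q.2.toNat)).sum ≤ pvSizeS d0 ds := by
  unfold pvSizeS pvLayerL
  exact List.single_le_sum (by simp) _
    (List.mem_map_of_mem (List.getD_eq_getElem ds 0 hj ▸ List.getElem_mem hj))

theorem pv_best_le_S (d0 : PySem.Dict Int (List (Int × Int))) (ds : List Int)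
    (best : PySem.Dict (Int × Int) Int) (hnd : best.keys.Nodup)
    (h3 : ∀ i h v, best.get? (i, h) = some v → pvDelta d0 ds i h = some v) :
    best.keys.length ≤ pvSizeS d0 ds + 1 := by
  have hsub : best.keys ⊆ ((-1 : Int), (0 : Int)) :: (List.range ds.length).flatMap
      (fun j => (pvF d0 ds (j + 1)).keys.map (fun h => ((j : Int), h))) := by
    rintro ⟨i, h⟩ hk
    have hne : best.get? (i, h) ≠ none := by
      intro hno
      rw [PySem.Dict.get?_eq_none_iff_not_mem_keys] at hno
      exact hno (by simpa using hk)
    obtain ⟨v, hv⟩ := Option.ne_none_iff_exists'.mp hne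
    have hd := h3 i h v hv
    unfold pvDelta at hd
    split at hd
    · rename_i hrange
      by_cases hi : i = -1
      · subst hi
        have h0 := pvF_zero_get? (show (pvF d0 ds 0).get? h = some v by simpa using hd)
        simp [h0.1]
      · have hi0 : 0 ≤ i := by omega
        have hjlt : i.toNat < ds.length := by omega
        refine List.mem_cons_of_mem _ (List.mem_flatMap.mpr ⟨i.toNat, List.mem_range.mpr hjlt, ?_⟩)
        have hT : (i + 1).toNat = i.toNat + 1 := by omega
        rw [hT] at hd
        have hmemk : h ∈ (pvF d0 ds (i.toNat + 1)).keys := by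
          by_contra hc
          rw [← PySem.Dict.get?_eq_none_iff_not_mem_keys] at hc
          rw [hc] at hd
          cases hd
        exact List.mem_map.mpr ⟨h, hmemk, by simp; omega⟩
    · cases hd
  refine le_trans (pv_nodup_subset_length hnd hsub) ?_
  simp only [List.length_cons, List.length_flatMap, List.map_map]
  have hpt : ∀ j ∈ List.range ds.length,
      (List.map (fun h => ((j : Int), h)) (pvF d0 ds (j + 1)).keys).length
        ≤ (((d0.get? (ds.getD j 0)).getD []).map (fun q => q.2.toNat)).sum := by
    intro j _
    simpa [pvLayerL] using pv_keys_length_le d0 ds j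
  have hsum := List.sum_le_sum hpt
  have heq : ((List.range ds.length).map
      (fun j => (((d0.get? (ds.getD j 0)).getD []).map (fun q => q.2.toNat)).sum)).sum
      = pvSizeS d0 ds := by
    unfold pvSizeS
    conv_rhs => rw [← pv_range_getD ds]
    rw [List.map_map]
    rfl
  omega

-- ---------- the cover lemma ----------

theorem pv_cover (d0 : PySem.Dict Int (List (Int × Int))) (ds : List Int)
    (heap : List (Int × Int × Int)) (best : PySem.Dict (Int × Int) Int)
    (inv : pvInv d0 ds heap best) :
    ∀ j : Nat, j ≤ ds.length → ∀ h d, (pvF d0 ds j).get? h = some d →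
      best.get? ((j : Int) - 1, h) = none →
      ∃ e ∈ heap, e.1 ≤ d := by
  obtain ⟨-, -, h3, -, h4, h5, -⟩ := inv
  intro j
  induction j with
  | zero =>
      intro _ h d hget hnone
      obtain ⟨rfl, rfl⟩ := pvF_zero_get? hget
      norm_num at hnone
      rcases h5 with ⟨c', hc, hle⟩ | ⟨w, hw⟩
      · exact ⟨(c', -1, 0), hc, hle⟩
      · rw [hnone] at hw; cases hw
  | succ j ih =>
      intro hj h d hget hnone
      obtain ⟨⟨h₀, c₀, a, hc₀, hedge, rfl⟩, -⟩ := pvF_succ_char hget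
      have ha : 0 ≤ a := (pv_gpa_mem hedge).1
      cases hbest : best.get? ((j : Int) - 1, h₀) with
      | none =>
          obtain ⟨e, he, hle⟩ := ih (by omega) h₀ c₀ hc₀ hbest
          exact ⟨e, he, by omega⟩
      | some w =>
          have hd := h3 _ _ _ hbest
          unfold pvDelta at hd
          rw [if_pos (by constructor <;> [omega; (push_cast; omega)])] at hd
          have hT : ((j : Int) - 1 + 1).toNat = j := by omega
          rw [hT] at hd
          have hwc : w = c₀ := by rw [hd] at hc₀; exact Option.some.inj hc₀
          have h4x := h4 ((j : Int) - 1) h₀ w hbest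
            (by push_cast; omega) a h (by rw [hT]; simpa using hedge)
          rcases h4x with ⟨c', hc', hle2⟩ | ⟨w', hw2⟩
          · refine ⟨(c', (j : Int) - 1 + 1, h), hc', ?_⟩
            simp only
            omega
          · rw [show ((j : Int) - 1 + 1) = ((j + 1 : Nat) : Int) - 1 by push_cast; omega] at hw2
            rw [hnone] at hw2
            cases hw2

-- ---------- the push-loop lemmas ----------

theorem pv_pushfold_mono {α : Type} (actions : List α) (guard : α → Bool)
    (f : α → Int × Int × Int) :
    ∀ (rest : List (Int × Int × Int)) (y : Int × Int × Int), y ∈ rest →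
      y ∈ actions.foldl (fun hp p => if guard p then hp else pvHeapPush hp (f p)) rest := by
  induction actions with
  | nil => intro rest y hy; exact hy
  | cons x t ih =>
      intro rest y hy
      simp only [List.foldl_cons]
      apply ih
      split
      · exact hy
      · exact pvHeapPush_mem.mpr (Or.inl hy)

theorem pv_pushfold_mem {α : Type} (actions : List α) (guard : α → Bool)
    (f : α → Int × Int × Int) :
    ∀ (rest : List (Int × Int × Int)) (y : Int × Int × Int),
      y ∈ actions.foldl (fun hp p => if guard p then hp else pvHeapPush hp (f p)) rest →
      y ∈ rest ∨ ∃ p ∈ actions, guard p = false ∧ y = f p := by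
  induction actions with
  | nil => intro rest y hy; exact Or.inl hy
  | cons x t ih =>
      intro rest y hy
      simp only [List.foldl_cons] at hy
      rcases ih _ y hy with hy' | ⟨p, hp, hg, rfl⟩
      · split at hy'
        · exact Or.inl hy'
        · rcases pvHeapPush_mem.mp hy' with hy'' | rfl
          · exact Or.inl hy''
          · exact Or.inr ⟨x, List.mem_cons_self, by rename_i hg; simpa using hg, rfl⟩
      · exact Or.inr ⟨p, List.mem_cons_of_mem _ hp, hg, rfl⟩

theorem pv_pushfold_sorted {α : Type} (actions : List α) (guard : α → Bool)
    (f : α → Int × Int × Int) :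
    ∀ (rest : List (Int × Int × Int)), pvSorted rest →
      pvSorted (actions.foldl (fun hp p => if guard p then hp else pvHeapPush hp (f p)) rest) := by
  induction actions with
  | nil => intro rest hs; exact hs
  | cons x t ih =>
      intro rest hs
      simp only [List.foldl_cons]
      apply ih
      split
      · exact hs
      · exact pvHeapPush_sorted _ hs

theorem pv_pushfold_length {α : Type} (actions : List α) (guard : α → Bool)
    (f : α → Int × Int × Int) :
    ∀ (rest : List (Int × Int × Int)),
      (actions.foldl (fun hp p => if guard p then hp else pvHeapPush hp (f p)) rest).length
        ≤ rest.length + actions.length := by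
  induction actions with
  | nil => intro rest; simp
  | cons x t ih =>
      intro rest
      simp only [List.foldl_cons]
      refine le_trans (ih _) ?_
      have : (if guard x = true then rest else pvHeapPush rest (f x)).length ≤ rest.length + 1 := by
        split
        · omega
        · rw [pvHeapPush_length]
      simp only [List.length_cons]
      omega

theorem pv_pushfold_covers {α : Type} (actions : List α) (guard : α → Bool)
    (f : α → Int × Int × Int) :
    ∀ (rest : List (Int × Int × Int)) (p : α), p ∈ actions →
      f p ∈ actions.foldl (fun hp q => if guard q then hp else pvHeapPush hp (f q)) rest ∨
        guard p = true := by
  induction actions with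
  | nil => intro rest p hp; cases hp
  | cons x t ih =>
      intro rest p hp
      rcases List.mem_cons.mp hp with rfl | hp'
      · by_cases hg : guard p = true
        · exact Or.inr hg
        · left
          simp only [List.foldl_cons, if_neg hg]
          exact pv_pushfold_mono t guard f _ _ (pvHeapPush_mem.mpr (Or.inr rfl))
      · simp only [List.foldl_cons]
        exact ih _ p hp'

theorem pv_pyGet_in (ds : List Int) (i : Int) (h0 : 0 ≤ i) (hl : i < ds.length) :
    (PySem.List.pyGet? ds i).getD 0 = ds.getD i.toNat 0 := by
  simp [PySem.List.pyGet?, PySem.List.pyIdx?, h0, hl, List.getD_eq_getElem?_getD]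

-- ---------- the main loop lemma ----------

theorem pv_main (d0 : PySem.Dict Int (List (Int × Int))) (ds : List Int)
    (hn : 1 ≤ ds.length) :
    ∀ fuel heap best, pvInv d0 ds heap best → pvMu d0 ds heap best < fuel →
      pvLoopA d0 ds ((ds.length : Int) - 1) fuel heap best =
        PySem.List.min? ((pvF d0 ds ds.length).values) (fun v => v) := by
  intro fuel
  induction fuel with
  | zero => intro heap best _ hmu; omega
  | succ fuel ih =>
      intro heap best hinv hmu
      have hinv' := hinv
      obtain ⟨hS, h2, h3, hnd, h4, h5, h6⟩ := hinv
      match heap, hS, hmu with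
      | [], _, _ =>
          show (none : Option Int) = _
          cases hval : (pvF d0 ds ds.length).values with
          | nil => rfl
          | cons v vs =>
              exfalso
              have hvmem : v ∈ (pvF d0 ds ds.length).values := by rw [hval]; exact List.mem_cons_self
              obtain ⟨⟨hh, vv⟩, hit, rfl⟩ := List.mem_map.mp hvmem
              have hget : (pvF d0 ds ds.length).get? hh = some vv :=
                PySem.Dict.get?_of_mem_items _ hit (pvF_nodup d0 ds _)
              have hbn : best.get? ((ds.length : Int) - 1, hh) = none := by
                cases hb : best.get? ((ds.length : Int) - 1, hh) with
                | none => rfl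
                | some w => exact absurd hb (fun hb => h6 hh w hb)
              obtain ⟨e, he, -⟩ := pv_cover d0 ds [] best hinv' ds.length (le_refl _) hh vv hget hbn
              cases he
      | (c, i, hh) :: rest, hS, hmu =>
          have hrS : pvSorted rest := (List.pairwise_cons.mp hS).2
          obtain ⟨d, hδ, hdc⟩ := h2 c i hh List.mem_cons_self
          have hbnd : -1 ≤ i ∧ i ≤ (ds.length : Int) - 1 := by
            by_contra hcon
            unfold pvDelta at hδ
            rw [if_neg hcon] at hδ
            cases hδ
          have hδ' : (pvF d0 ds (i + 1).toNat).get? hh = some d := by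
            have hx := hδ
            unfold pvDelta at hx
            rwa [if_pos hbnd] at hx
          cases hb : best.get? (i, hh) with
          | some v =>
              -- the skip branch: v = pvDelta value ≤ c, so the guard fires
              have hv : v = d := by
                have hx := h3 i hh v hb
                rw [hδ] at hx
                exact (Option.some.inj hx).symm
              have hguard : v ≤ c := by omega
              simp only [pvLoopA, hb]
              rw [if_pos (by simpa using hguard)]
              · refine ih rest best ⟨hrS, ?_, h3, hnd, ?_, ?_, h6⟩ ?_
                · intro c' i' h' hm; exact h2 c' i' h' (List.mem_cons_of_mem _ hm)
                · intro i₀ h₀ v₀ hbv hi₀ a h' hedge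
                  rcases h4 i₀ h₀ v₀ hbv hi₀ a h' hedge with ⟨c', hc', hle⟩ | hsett
                  · rcases List.mem_cons.mp hc' with heq | hmem
                    · injection heq with e1 e2; injection e2 with e3 e4
                      refine Or.inr ⟨v, ?_⟩
                      rw [e3, e4]; exact hb
                    · exact Or.inl ⟨c', hmem, hle⟩
                  · exact Or.inr hsett
                · rcases h5 with ⟨c', hc', hle⟩ | hsett
                  · rcases List.mem_cons.mp hc' with heq | hmem
                    · injection heq with e1 e2; injection e2 with e3 e4
                      refine Or.inr ⟨v, ?_⟩
                      rw [← e3, ← e4] at hb; exact hb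
                    · exact Or.inl ⟨c', hmem, hle⟩
                  · exact Or.inr hsett
                · unfold pvMu at hmu ⊢
                  simp only [List.length_cons] at hmu
                  omega
          | none =>
              -- the settle branch
              have hcov : ∃ e ∈ (c, i, hh) :: rest, e.1 ≤ d := by
                have hT : (((i + 1).toNat : Int)) - 1 = i := by omega
                refine pv_cover d0 ds _ best hinv' (i + 1).toNat (by omega) hh d ?_ ?_
                · rw [show ((i + 1).toNat) = (i + 1).toNat from rfl]; exact hδ'
                · rw [hT]; exact hb
              obtain ⟨e, he, hed⟩ := hcov
              have hce : c ≤ e.1 := pvSorted_head_min hS he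
              have hcd : c = d := by omega
              subst hcd
              simp only [pvLoopA, hb]
              rw [if_neg (by simp)]
              show (if (ds.length : Int) - 1 < i + 1 then some c
                else pvLoopA d0 ds ((ds.length : Int) - 1) fuel
                  ((get_permissible_actions
                      ((PySem.List.pyGet? ds (i + 1)).getD 0
                        - (if 0 ≤ i then (PySem.List.pyGet? ds i).getD 0 else 0)) hh
                      ((d0.get? ((PySem.List.pyGet? ds (i + 1)).getD 0)).getD [])).foldl
                    (fun hp p =>
                      if (match (best.insert (i, hh) c).get? (i + 1, p.2) with
                          | some v => decide (v ≤ c + p.1) | none => false)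
                      then hp else pvHeapPush hp (c + p.1, i + 1, p.2)) rest)
                  (best.insert (i, hh) c)) = _
              by_cases hfin : (ds.length : Int) - 1 < i + 1
              · -- reached the end: return c, which is the minimum over the last layer
                have hieq : i = (ds.length : Int) - 1 := by omega
                have hTn : (i + 1).toNat = ds.length := by omega
                rw [hTn] at hδ'
                rw [if_pos hfin]
                have hcval : c ∈ (pvF d0 ds ds.length).values :=
                  List.mem_map.mpr ⟨(hh, c), PySem.Dict.mem_items_of_get?_eq_some _ hδ', rfl⟩
                have hall : ∀ v ∈ (pvF d0 ds ds.length).values, c ≤ v := by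
                  intro v hvv
                  obtain ⟨⟨h₂, vv⟩, hit, rfl⟩ := List.mem_map.mp hvv
                  have hget : (pvF d0 ds ds.length).get? h₂ = some vv :=
                    PySem.Dict.get?_of_mem_items _ hit (pvF_nodup d0 ds _)
                  have hbn : best.get? ((ds.length : Int) - 1, h₂) = none := by
                    cases hb2 : best.get? ((ds.length : Int) - 1, h₂) with
                    | none => rfl
                    | some w => exact absurd hb2 (fun hb2 => h6 h₂ w hb2)
                  obtain ⟨e2, he2, hed2⟩ :=
                    pv_cover d0 ds _ best hinv' ds.length (le_refl _) h₂ vv hget hbn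
                  have := pvSorted_head_min hS he2
                  omega
                cases hmin : PySem.List.min? ((pvF d0 ds ds.length).values) (fun v => v) with
                | none =>
                    rw [(PySem.List.min?_eq_none_iff _ _).mp hmin] at hcval
                    cases hcval
                | some m =>
                    have hm1 : m ∈ (pvF d0 ds ds.length).values := PySem.List.min?_mem hmin
                    have hm2 := PySem.List.min?_isMin hmin c hcval
                    have hm3 := hall m hm1
                    rw [show c = m by omega]
              · -- interior layer: settle (i, hh) and push the successors
                have hi1 : i + 1 ≤ (ds.length : Int) - 1 := by omega
                set j : Nat := (i + 1).toNat with hj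
                have hjlt : j < ds.length := by omega
                have hj1 : (i + 1 + 1).toNat = j + 1 := by omega
                set best' := best.insert (i, hh) c with hbest'
                -- A's computed gap and layer are the DP's gap and layer
                have hnext : (PySem.List.pyGet? ds (i + 1)).getD 0 = ds.getD j 0 := by
                  rw [pv_pyGet_in ds (i + 1) (by omega) (by omega)]
                have hdist : (if 0 ≤ i then (PySem.List.pyGet? ds i).getD 0 else 0)
                    = pvPrevD ds j := by
                  by_cases h0 : 0 ≤ i
                  · rw [if_pos h0, pv_pyGet_in ds i h0 (by omega), pvPrevD,
                      if_neg (by omega)]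
                    congr 1
                    omega
                  · rw [if_neg h0, pvPrevD, if_pos (by omega)]
                rw [if_neg hfin, hnext, hdist]
                set actions := get_permissible_actions (ds.getD j 0 - pvPrevD ds j) hh
                  ((d0.get? (ds.getD j 0)).getD []) with hact
                have hactions : actions
                    = get_permissible_actions (pvGapL ds j) hh (pvLayerL d0 ds j) := rfl
                set guard : Int × Int → Bool := fun p =>
                  (match best'.get? (i + 1, p.2) with
                    | some v => decide (v ≤ c + p.1) | none => false) with hguard
                set heap' := actions.foldl
                  (fun hp p => if guard p then hp else pvHeapPush hp (c + p.1, i + 1, p.2)) rest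
                  with hheap'
                have hδj : (pvF d0 ds j).get? hh = some c := hδ'
                -- lookups in best'
                have hget' : ∀ k : Int × Int, best'.get? k
                    = if k = (i, hh) then some c else best.get? k := by
                  intro k; rw [hbest', PySem.Dict.get?_insert]
                -- new entries are δ-consistent
                have hinv2 : ∀ c' i' h', (c', i', h') ∈ heap' →
                    ∃ d', pvDelta d0 ds i' h' = some d' ∧ d' ≤ c' := by
                  intro c' i' h' hm
                  rcases pv_pushfold_mem actions guard _ rest _ hm with hm' | ⟨p, hp, hg, heq⟩
                  · exact h2 c' i' h' (List.mem_cons_of_mem _ hm')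
                  · injection heq with e1 e2; injection e2 with e3 e4
                    subst e1; subst e3; subst e4
                    obtain ⟨v', hv', hvle⟩ := pvF_succ_le hδj (hactions ▸ hp)
                    refine ⟨v', ?_, hvle⟩
                    unfold pvDelta
                    rw [if_pos ⟨by omega, by omega⟩, hj1]
                    exact hv'
                refine ih heap' best' ⟨?_, hinv2, ?_, ?_, ?_, ?_, ?_⟩ ?_
                · exact pv_pushfold_sorted actions guard _ rest hrS
                · -- h3 for best'
                  intro i₀ h₀ v₀ hbv
                  rw [hget'] at hbv
                  split at hbv
                  · rename_i hkey
                    injection hkey with k1 k2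
                    subst k1; subst k2
                    rw [hδ]
                    exact congrArg some (Option.some.inj hbv)
                  · exact h3 i₀ h₀ v₀ hbv
                · exact hbest' ▸ PySem.Dict.nodup_keys_insert _ _ _ hnd
                · -- h4 for (heap', best')
                  intro i₀ h₀ v₀ hbv hi₀ a h' hedge
                  rw [hget'] at hbv
                  split at hbv
                  · rename_i hkey
                    injection hkey with k1 k2
                    have hcv : v₀ = c := (Option.some.inj hbv).symm
                    rw [k1, k2] at hedge
                    rw [k1, hcv]
                    rcases pv_pushfold_covers actions guard
                        (fun p => (c + p.1, i + 1, p.2)) rest (a, h') (hactions ▸ hedge)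
                      with hmem | hg
                    · exact Or.inl ⟨c + a, hmem, le_refl _⟩
                    · right
                      rw [hguard] at hg
                      dsimp only at hg
                      cases hbg : best'.get? (i + 1, h') with
                      | none => rw [hbg] at hg; cases hg
                      | some w => exact ⟨w, rfl⟩
                  · rcases h4 i₀ h₀ v₀ hbv hi₀ a h' hedge with ⟨c', hc', hle⟩ | ⟨w, hw⟩
                    · rcases List.mem_cons.mp hc' with heq | hmem
                      · injection heq with e1 e2; injection e2 with e3 e4
                        right
                        refine ⟨c, ?_⟩
                        rw [e3, e4, hget', if_pos rfl]
                      · exact Or.inl ⟨c', pv_pushfold_mono actions guard _ rest _ hmem, hle⟩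
                    · right
                      by_cases hkey : ((i₀ + 1 : Int), h') = ((i : Int), hh)
                      · rw [hkey] at hw; rw [hw] at hb; cases hb
                      · exact ⟨w, by rw [hget', if_neg hkey]; exact hw⟩
                · -- h5 for (heap', best')
                  by_cases hstart : ((i : Int), hh) = ((-1 : Int), (0 : Int))
                  · right
                    refine ⟨c, ?_⟩
                    rw [← hstart, hget', if_pos rfl]
                  · rcases h5 with ⟨c', hc', hle⟩ | ⟨w, hw⟩
                    · rcases List.mem_cons.mp hc' with heq | hmem
                      · exfalso
                        injection heq with e1 e2; injection e2 with e3 e4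
                        exact hstart (by rw [e3, e4])
                      · exact Or.inl ⟨c', pv_pushfold_mono actions guard _ rest _ hmem, hle⟩
                    · right
                      refine ⟨w, ?_⟩
                      rw [hget', if_neg (fun hk : ((-1:Int),(0:Int)) = ((i:Int), hh) => hstart hk.symm)]
                      exact hw
                · -- h6 for best'
                  intro h₀ w hw
                  rw [hget'] at hw
                  split at hw
                  · rename_i hkey
                    injection hkey with k1 k2
                    omega
                  · exact h6 h₀ w hw
                · -- the measure decreases
                  have hb' : best'.keys.length = best.keys.length + 1 := by
                    rw [hbest', PySem.Dict.keys_insert_of_not_contains _ _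
                      ((PySem.Dict.get?_eq_none_iff_contains _ _).mp hb)]
                    simp
                  have hble : best'.keys.length ≤ pvSizeS d0 ds + 1 := by
                    refine pv_best_le_S d0 ds best' (hbest' ▸ PySem.Dict.nodup_keys_insert _ _ _ hnd) ?_
                    intro i₀ h₀ v₀ hbv
                    rw [hget'] at hbv
                    split at hbv
                    · rename_i hkey
                      injection hkey with k1 k2
                      subst k1; subst k2
                      rw [hδ]
                      exact congrArg some (Option.some.inj hbv)
                    · exact h3 i₀ h₀ v₀ hbv
                  have hlen : heap'.length ≤ rest.length + actions.length :=
                    pv_pushfold_length actions guard _ rest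
                  have halen : actions.length ≤ pvSizeS d0 ds := by
                    rw [hactions]
                    exact le_trans (pv_gpa_length _) (pv_layer_le_S d0 ds j hjlt)
                  rw [hb'] at hble
                  unfold pvMu at hmu ⊢
                  simp only [List.length_cons] at hmu
                  rw [hb']
                  have hx : pvSizeS d0 ds + 1 - best.keys.length
                      = (pvSizeS d0 ds + 1 - (best.keys.length + 1)) + 1 := by omega
                  have hmul : (pvSizeS d0 ds + 2) * (pvSizeS d0 ds + 1 - best.keys.length)
                      = (pvSizeS d0 ds + 2) * (pvSizeS d0 ds + 1 - (best.keys.length + 1))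
                        + (pvSizeS d0 ds + 2) := by
                    rw [hx, Nat.mul_add, Nat.mul_one]
                  omega


-- ===== VERDICT (by name: the statement is the Claim_ definition above) =====
theorem search_spec : Claim_equal_search := by
  intro openings _
  unfold Spec_search
  cases openings with
  | nil => decide
  | cons o os =>
      rw [search_alt_eq_dp]
      show pvLoopA (PySem.Dict.mk (o :: os)) (PySem.Dict.mk (o :: os)).keys
          (((PySem.Dict.mk (o :: os)).keys.length : Int) - 1)
          (pvFuel (PySem.Dict.mk (o :: os)) (PySem.Dict.mk (o :: os)).keys)
          [(0, -1, 0)] PySem.Dict.empty = _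
      have hn : 1 ≤ (PySem.Dict.mk (o :: os)).keys.length := by
        simp [PySem.Dict.keys]
      apply pv_main _ _ hn
      · refine ⟨List.pairwise_singleton _ _, ?_, ?_, ?_, ?_, ?_, ?_⟩
        · intro c i h hm
          rw [List.mem_singleton] at hm
          injection hm with e1 e2
          injection e2 with e3 e4
          subst e1; subst e3; subst e4
          refine ⟨0, ?_, le_refl 0⟩
          unfold pvDelta
          rw [if_pos ⟨le_refl _, by push_cast; omega⟩,
            show ((-1 : Int) + 1).toNat = 0 by norm_num]
          simp [pvF, PySem.Dict.get?_mk_cons]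
        · intro i h v hb
          rw [PySem.Dict.get?_empty] at hb
          cases hb
        · simp [PySem.Dict.empty, PySem.Dict.keys]
        · intro i h v hb
          rw [PySem.Dict.get?_empty] at hb
          cases hb
        · exact Or.inl ⟨0, List.mem_singleton.mpr rfl, le_refl 0⟩
        · intro h w hb
          rw [PySem.Dict.get?_empty] at hb
          cases hb
      · unfold pvMu pvFuel
        rw [show (PySem.Dict.empty : PySem.Dict (Int × Int) Int).keys.length = 0 from rfl]
        have hmul : (pvSizeS (PySem.Dict.mk (o :: os)) (PySem.Dict.mk (o :: os)).keys + 2)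
            * (pvSizeS (PySem.Dict.mk (o :: os)) (PySem.Dict.mk (o :: os)).keys + 2)
            = (pvSizeS (PySem.Dict.mk (o :: os)) (PySem.Dict.mk (o :: os)).keys + 2)
              * (pvSizeS (PySem.Dict.mk (o :: os)) (PySem.Dict.mk (o :: os)).keys + 1)
              + (pvSizeS (PySem.Dict.mk (o :: os)) (PySem.Dict.mk (o :: os)).keys + 2) := by
          ring
        simp only [List.length_singleton, Nat.sub_zero]
        omega
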